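-- pv_equiv track=rewrite | github.com/abimarticio/practice-problems | basic/prob_10_sol_1.py | consonant_beginning
-- ===== SOURCE A (Python) =====
-- def consonant_beginning(word):
--     cons_list = []
--     for index in range(len(word)):
--         for i in range(len(word)):
--             if word[index] not in ('A', 'E', 'I', 'O', 'U'):
--                 new_word = word[index:i+1]
--                 if new_word != "":
--                     cons_list.append(new_word)
--
--     cons = {}
--     for word in cons_list:
--         count = cons_list.count(word)
--         cons[word] = count
--
--     total = 0
--     for value in cons.values():
--         total += value
--     return total
-- ===== SOURCE B (Python) =====
-- def consonant_beginning(word):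
--     n = len(word)
--     return sum(n - i for i, ch in enumerate(word) if ch not in ('A', 'E', 'I', 'O', 'U'))
-- ===== Notes on version B (the rewrite author's own statement) =====
-- stated objective: faster
-- what changed: Replaced the nested substring collection plus dict-of-counts totalling (the total of counts is just the number of collected substrings) by a single pass that adds len(word)-i for every non-vowel position i.
import Mathlib
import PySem

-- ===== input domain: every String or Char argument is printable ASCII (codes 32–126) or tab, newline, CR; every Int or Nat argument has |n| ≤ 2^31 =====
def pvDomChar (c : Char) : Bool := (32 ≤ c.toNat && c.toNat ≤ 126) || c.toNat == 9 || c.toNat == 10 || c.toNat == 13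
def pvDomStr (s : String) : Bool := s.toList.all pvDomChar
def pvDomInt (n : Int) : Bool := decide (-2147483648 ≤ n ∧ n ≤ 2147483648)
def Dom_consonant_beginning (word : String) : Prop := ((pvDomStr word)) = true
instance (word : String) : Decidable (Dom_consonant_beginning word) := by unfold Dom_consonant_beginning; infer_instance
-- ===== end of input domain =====

-- B replaces A's O(n^3+) nested substring/dict counting with a single pass summing (len - index)
-- over non-vowel positions (the dict-of-counts total is just the number of collected substrings).

-- ===== PORT A =====
def consonant_beginning (word : String) : Int :=
  let cs := word.toList
  let n : Int := cs.length
  let cons_list : List (List Char) :=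
    (PySem.List.pyRange 0 n 1).foldl (fun acc index =>
      (PySem.List.pyRange 0 n 1).foldl (fun acc i =>
        if PySem.List.pyGetD cs index ' ' ∉ ['A', 'E', 'I', 'O', 'U'] then
          let new_word := PySem.List.slice cs (some index) (some (i + 1))
          if new_word ≠ [] then acc ++ [new_word] else acc
        else acc) acc) []
  let cons : PySem.Dict (List Char) Int :=
    cons_list.foldl (fun d w => d.insert w ((PySem.List.count cons_list w : Nat) : Int))
      PySem.Dict.empty
  cons.values.foldl (fun total v => total + v) 0

-- ===== PORT B =====
def consonant_beginning_alt (word : String) : Int :=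
  let cs := word.toList
  let n : Int := cs.length
  (((PySem.List.enumerate cs 0).filter
      (fun p => p.2 ∉ ['A', 'E', 'I', 'O', 'U'])).map (fun p => n - p.1)).sum

-- ===== PRECONDITION & SPEC =====
def Spec_consonant_beginning (word : String) (out : Int) : Prop := out = consonant_beginning_alt word
instance (word : String) (out : Int) : Decidable (Spec_consonant_beginning word out) := by unfold Spec_consonant_beginning; infer_instance

-- ===== CLAIM (what is proved, stated in full; the proofs are below) =====
def Claim_equal_consonant_beginning : Prop := ∀ (word : String), Dom_consonant_beginning word → Spec_consonant_beginning word (consonant_beginning word)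

-- ===== LEMMAS AND PROOFS =====

-- common value both sides reduce to: for each non-vowel position, its suffix length
def pvGsum : List Char → Int
  | [] => 0
  | c :: t => (if c ∉ ['A', 'E', 'I', 'O', 'U'] then ((t.length : Int) + 1) else 0) + pvGsum t

lemma pv_dict_getD (l : List (List Char)) (f : List Char → Int) (k : List Char) :
    ∀ d : PySem.Dict (List Char) Int,
      (l.foldl (fun d w => d.insert w (f w)) d).getD k 0
        = if k ∈ l then f k else d.getD k 0 := by
  induction l with
  | nil => intro d; simp
  | cons w t ih =>
    intro d
    simp only [List.foldl_cons, ih, PySem.Dict.getD_insert, List.mem_cons]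
    by_cases hkt : k ∈ t <;> by_cases hkw : k = w <;> simp [hkt, hkw]

lemma pv_dict_sum (l : List (List Char)) :
    ((l.foldl (fun d w => d.insert w ((PySem.List.count l w : Nat) : Int))
        PySem.Dict.empty).values).foldl (fun total v => total + v) 0
      = (l.length : Int) := by
  set d := l.foldl (fun d w => d.insert w ((PySem.List.count l w : Nat) : Int)) PySem.Dict.empty with hd
  have hnd : d.keys.Nodup := by
    rw [hd]; exact PySem.Dict.nodup_keys_foldl_insert l _ _ PySem.Dict.nodup_keys_empty
  have hkeys : d.keys = PySem.Set.ofList l := by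
    rw [hd, PySem.Dict.keys_foldl_insert, PySem.Dict.keys_empty]
    exact PySem.Set.update_empty l
  have hvals : d.values = d.keys.map (fun k => d.getD k 0) :=
    PySem.Dict.values_eq_map_keys d hnd 0
  rw [PySem.List.foldl_add d.values (fun v => v) 0, zero_add, List.map_id', hvals]
  have hmap : d.keys.map (fun k => d.getD k 0)
      = d.keys.map (fun k => ((List.count k l : Nat) : Int)) := by
    apply List.map_congr_left
    intro k hk
    have hkl : k ∈ l := by
      rw [hkeys] at hk; exact (PySem.Set.mem_ofList l k).mp hk
    rw [hd, pv_dict_getD l _ k PySem.Dict.empty, if_pos hkl]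
    rfl
  rw [hmap]
  have hcnt : ∀ (m : List (List Char)) (k : List Char), List.count k m
      = @List.count (List Char) instBEqOfDecidableEq k m := by
    intro m k
    induction m with
    | nil => simp
    | cons b t ih => simp [List.count_cons, ih, beq_iff_eq]
  have hperm : d.keys.Perm l.dedup := by
    rw [hkeys]
    refine (List.perm_ext_iff_of_nodup (PySem.Set.nodup_ofList l) l.nodup_dedup).mpr ?_
    intro a
    rw [PySem.Set.mem_ofList, List.mem_dedup]
  have := (hperm.map (fun k => ((List.count k l : Nat) : Int))).sum_eq
  rw [this]
  have hnat : (l.dedup.map (fun k => List.count k l)).sum = l.length := by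
    rw [show (l.dedup.map (fun k => List.count k l))
        = (l.dedup.map (fun k => @List.count (List Char) instBEqOfDecidableEq k l)) from
      List.map_congr_left (fun k _ => hcnt l k)]
    exact List.sum_map_count_dedup_eq_length l
  have hcast : (l.dedup.map (fun k => ((List.count k l : Nat) : Int))).sum
      = ((l.dedup.map (fun k => List.count k l)).sum : Int) := by
    rw [Nat.cast_list_sum, List.map_map]; rfl
  rw [hcast, hnat]

lemma pv_slice_ne_nil_iff (cs : List Char) (index i : Int)
    (h0 : 0 ≤ index) (h1 : index < cs.length) (h2 : 0 ≤ i) :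
    (PySem.List.slice cs (some index) (some (i + 1)) ≠ []) ↔ index ≤ i := by
  rw [PySem.List.slice_toNat (xs := cs) (a := index) (b := i + 1) h0 (by omega)]
  rw [← List.length_pos_iff_ne_nil, List.length_take, List.length_drop]
  omega

lemma pv_inner_eq (cs : List Char) (index : Int) (n : Int) (hn : n = cs.length)
    (h0 : 0 ≤ index) (h1 : index < cs.length) :
    ∀ acc : List (List Char),
      (PySem.List.pyRange 0 n 1).foldl (fun acc i =>
        if PySem.List.pyGetD cs index ' ' ∉ ['A', 'E', 'I', 'O', 'U'] then
          let new_word := PySem.List.slice cs (some index) (some (i + 1))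
          if new_word ≠ [] then acc ++ [new_word] else acc
        else acc) acc
      = acc ++ (if PySem.List.pyGetD cs index ' ' ∉ ['A', 'E', 'I', 'O', 'U'] then
          (PySem.List.pyRange index n 1).map
            (fun i => PySem.List.slice cs (some index) (some (i + 1))) else []) := by
  intro acc
  by_cases hP : PySem.List.pyGetD cs index ' ' ∉ ['A', 'E', 'I', 'O', 'U']
  · have hbody : (PySem.List.pyRange 0 n 1).foldl (fun acc i =>
        if PySem.List.pyGetD cs index ' ' ∉ ['A', 'E', 'I', 'O', 'U'] then
          let new_word := PySem.List.slice cs (some index) (some (i + 1))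
          if new_word ≠ [] then acc ++ [new_word] else acc
        else acc) acc
        = (PySem.List.pyRange 0 n 1).foldl (fun acc i =>
            if (decide (PySem.List.slice cs (some index) (some (i + 1)) ≠ [])) = true then
              acc ++ [PySem.List.slice cs (some index) (some (i + 1))] else acc) acc := by
      apply PySem.List.foldl_congr_mem
      intro a i _
      simp only [if_pos hP, decide_eq_true_eq]
    rw [hbody, PySem.List.foldl_append_if, if_pos hP]
    congr 1
    have hfilter : (PySem.List.pyRange 0 n 1).filter
        (fun i => decide (PySem.List.slice cs (some index) (some (i + 1)) ≠ []))
        = PySem.List.pyRange index n 1 := by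
      rw [PySem.List.pyRange_one_append 0 index n h0 (by omega),
          List.filter_append]
      have h1' : (PySem.List.pyRange 0 index 1).filter
          (fun i => decide (PySem.List.slice cs (some index) (some (i + 1)) ≠ [])) = [] := by
        apply List.filter_eq_nil_iff.mpr
        intro i hi
        have hi' := PySem.List.mem_pyRange_one.mp hi
        simp only [decide_eq_true_eq, not_not]
        by_contra hne
        have := (pv_slice_ne_nil_iff cs index i h0 h1 hi'.1).mp (by simpa using hne)
        omega
      have h2' : (PySem.List.pyRange index n 1).filter
          (fun i => decide (PySem.List.slice cs (some index) (some (i + 1)) ≠ []))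
          = PySem.List.pyRange index n 1 := by
        apply List.filter_eq_self.mpr
        intro i hi
        have hi' := PySem.List.mem_pyRange_one.mp hi
        simp only [decide_eq_true_eq]
        exact (pv_slice_ne_nil_iff cs index i h0 h1 (by omega)).mpr hi'.1
      rw [h1', h2', List.nil_append]
    rw [hfilter]
  · rw [if_neg hP, List.append_nil]
    induction (PySem.List.pyRange 0 n 1) generalizing acc with
    | nil => rfl
    | cons x t ih =>
      rw [List.foldl_cons, show (if PySem.List.pyGetD cs index ' ' ∉ ['A', 'E', 'I', 'O', 'U'] then
          let new_word := PySem.List.slice cs (some index) (some (x + 1))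
          if new_word ≠ [] then acc ++ [new_word] else acc
        else acc) = acc from if_neg hP]
      exact ih acc

lemma pv_range_sum_eq_gsum (cs : List Char) :
    (((List.range cs.length).map (fun (j : Nat) =>
        if PySem.List.pyGetD cs (j : Int) ' ' ∉ ['A', 'E', 'I', 'O', 'U'] then
          ((cs.length : Int) - (j : Int)) else 0)).sum) = pvGsum cs := by
  induction cs with
  | nil => simp [pvGsum]
  | cons c t ih =>
    rw [List.length_cons, List.range_succ_eq_map]
    simp only [List.map_cons, List.map_map, List.sum_cons]
    have h0 : PySem.List.pyGetD (c :: t) (((0 : Nat) : Int)) ' ' = c :=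
      PySem.List.pyGetD_zero_cons c t ' '
    have hrest : (List.range t.length).map ((fun (j : Nat) =>
        if PySem.List.pyGetD (c :: t) (j : Int) ' ' ∉ ['A', 'E', 'I', 'O', 'U'] then
          (((t.length + 1 : Nat) : Int) - (j : Int)) else 0) ∘ Nat.succ)
        = (List.range t.length).map (fun (j : Nat) =>
        if PySem.List.pyGetD t (j : Int) ' ' ∉ ['A', 'E', 'I', 'O', 'U'] then
          ((t.length : Int) - (j : Int)) else 0) := by
      apply List.map_congr_left
      intro j _
      simp only [Function.comp, Nat.succ_eq_add_one]
      have hget : PySem.List.pyGetD (c :: t) (((j + 1 : Nat)) : Int) ' '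
          = PySem.List.pyGetD t ((j : Nat) : Int) ' ' := by
        rw [PySem.List.pyGetD_natCast, PySem.List.pyGetD_natCast]
        rfl
      rw [hget]
      have harith : (((t.length + 1 : Nat) : Int) - (((j + 1 : Nat)) : Int))
          = ((t.length : Int) - (j : Int)) := by push_cast; ring
      rw [harith]
    rw [hrest, ih, h0, pvGsum]
    have harith0 : (((t.length + 1 : Nat) : Int) - ((0 : Nat) : Int))
        = (t.length : Int) + 1 := by push_cast; ring
    rw [harith0]

lemma pv_A_eq_gsum (word : String) : consonant_beginning word = pvGsum word.toList := by
  unfold consonant_beginning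
  set cs := word.toList with hcs
  set n : Int := (cs.length : Int) with hn
  simp only []
  rw [pv_dict_sum]
  -- cons_list = flatMap of per-index contribution
  have houter : (PySem.List.pyRange 0 n 1).foldl (fun acc index =>
      (PySem.List.pyRange 0 n 1).foldl (fun acc i =>
        if PySem.List.pyGetD cs index ' ' ∉ ['A', 'E', 'I', 'O', 'U'] then
          let new_word := PySem.List.slice cs (some index) (some (i + 1))
          if new_word ≠ [] then acc ++ [new_word] else acc
        else acc) acc) ([] : List (List Char))
      = List.flatMap (fun index =>
          (if PySem.List.pyGetD cs index ' ' ∉ ['A', 'E', 'I', 'O', 'U'] then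
            (PySem.List.pyRange index n 1).map
              (fun i => PySem.List.slice cs (some index) (some (i + 1))) else []))
          (PySem.List.pyRange 0 n 1) := by
    rw [show (List.flatMap _ (PySem.List.pyRange 0 n 1) : List (List Char))
        = [] ++ List.flatMap (fun index =>
          (if PySem.List.pyGetD cs index ' ' ∉ ['A', 'E', 'I', 'O', 'U'] then
            (PySem.List.pyRange index n 1).map
              (fun i => PySem.List.slice cs (some index) (some (i + 1))) else []))
          (PySem.List.pyRange 0 n 1) from (List.nil_append _).symm]
    rw [← PySem.List.foldl_append_eq_flatMap]
    apply PySem.List.foldl_congr_mem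
    intro acc index hmem
    have hidx := PySem.List.mem_pyRange_one.mp hmem
    exact pv_inner_eq cs index n hn hidx.1 (by omega) acc
  rw [houter, List.length_flatMap]
  -- per-index length, cast to Int
  have hlen : ((List.map (fun index => ((if PySem.List.pyGetD cs index ' ' ∉ ['A', 'E', 'I', 'O', 'U'] then
        (PySem.List.pyRange index n 1).map
          (fun i => PySem.List.slice cs (some index) (some (i + 1))) else []) : List (List Char)).length)
        (PySem.List.pyRange 0 n 1)).sum : Int)
      = (((PySem.List.pyRange 0 n 1).map (fun index =>
          if PySem.List.pyGetD cs index ' ' ∉ ['A', 'E', 'I', 'O', 'U'] then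
            (n - index) else 0)).sum) := by
    rw [Nat.cast_list_sum, List.map_map]
    apply congrArg List.sum
    apply List.map_congr_left
    intro index hmem
    have hidx := PySem.List.mem_pyRange_one.mp hmem
    simp only [Function.comp]
    by_cases hP : PySem.List.pyGetD cs index ' ' ∉ ['A', 'E', 'I', 'O', 'U']
    · rw [if_pos hP, if_pos hP, List.length_map, PySem.List.length_pyRange_one]
      omega
    · rw [if_neg hP, if_neg hP]; rfl
  rw [hlen]
  -- convert pyRange to List.range and finish with pv_range_sum_eq_gsum
  rw [hn, PySem.List.pyRange_zero_nat, List.map_map]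
  refine Eq.trans ?_ (pv_range_sum_eq_gsum cs)
  apply congrArg List.sum
  apply List.map_congr_left
  intro j _
  rfl

lemma pv_B_enum (t : List Char) :
    ∀ (s n : Int), n = s + t.length →
      (((PySem.List.enumerate t s).filter
          (fun p => p.2 ∉ ['A', 'E', 'I', 'O', 'U'])).map (fun p => n - p.1)).sum = pvGsum t := by
  induction t with
  | nil => intro s n _; simp [PySem.List.enumerate, pvGsum]
  | cons c t ih =>
    intro s n hns
    rw [PySem.List.enumerate_cons]
    have hn' : n = (s + 1) + t.length := by
      rw [hns, List.length_cons]; push_cast; ring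
    by_cases hP : c ∉ ['A', 'E', 'I', 'O', 'U']
    · rw [List.filter_cons_of_pos (by simpa using hP)]
      rw [List.map_cons, List.sum_cons, ih (s + 1) n hn', pvGsum, if_pos hP]
      have : n - s = (t.length : Int) + 1 := by omega
      rw [this]
    · rw [List.filter_cons_of_neg (by simpa using hP)]
      rw [ih (s + 1) n hn', pvGsum, if_neg hP, zero_add]

lemma pv_B_eq_gsum (word : String) : consonant_beginning_alt word = pvGsum word.toList := by
  unfold consonant_beginning_alt
  exact pv_B_enum word.toList 0 (word.toList.length : Int) (by omega)

-- ===== VERDICT (by name: the statement is the Claim_ definition above) =====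
theorem consonant_beginning_spec : Claim_equal_consonant_beginning := by
  intro word _
  unfold Spec_consonant_beginning
  rw [pv_A_eq_gsum, pv_B_eq_gsum]
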